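-- pv_equiv track=rewrite | github.com/gaskam/derivcalc | derivcalc.py | LGB
-- ===== SOURCE A (Python) =====
-- FUNCTIONS = ('sin', 'cos', 'tan', 'log', 'exp', 'sqrt', 'ctg', 'neg')
--
-- OPERATORS = ('+', '-', '*', '/', '^')
--
-- def LGB(postfix: list, index: int) -> int:
--     remaining = 1
--     i = index
--     while remaining > 0:
--         remaining -= 1
--         if postfix[i] in FUNCTIONS:
--             remaining += 1
--         elif postfix[i] in OPERATORS:
--             remaining += 2
--         i -= 1
--
--     return i + 1
-- ===== SOURCE B (Python) =====
-- FUNCTIONS = ('sin', 'cos', 'tan', 'log', 'exp', 'sqrt', 'ctg', 'neg')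
--
-- OPERATORS = ('+', '-', '*', '/', '^')
--
-- def LGB(postfix: list, index: int) -> int:
--     def start(end):
--         token = postfix[end]
--         if token in FUNCTIONS:
--             return start(end - 1)
--         if token in OPERATORS:
--             s = start(end - 1)
--             return start(s - 1)
--         return end
--     return start(index)
-- ===== Notes on version B (the rewrite author's own statement) =====
-- stated objective: alternative
-- what changed: Replaced A's backward while-loop that counts still-owed operands with a recursive start(end) helper that descends the nested postfix tree (function: recurse once; operator: recurse for the right operand, then again from before its start for the left), preserving Python's negative-index wraparound.
import Mathlib
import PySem

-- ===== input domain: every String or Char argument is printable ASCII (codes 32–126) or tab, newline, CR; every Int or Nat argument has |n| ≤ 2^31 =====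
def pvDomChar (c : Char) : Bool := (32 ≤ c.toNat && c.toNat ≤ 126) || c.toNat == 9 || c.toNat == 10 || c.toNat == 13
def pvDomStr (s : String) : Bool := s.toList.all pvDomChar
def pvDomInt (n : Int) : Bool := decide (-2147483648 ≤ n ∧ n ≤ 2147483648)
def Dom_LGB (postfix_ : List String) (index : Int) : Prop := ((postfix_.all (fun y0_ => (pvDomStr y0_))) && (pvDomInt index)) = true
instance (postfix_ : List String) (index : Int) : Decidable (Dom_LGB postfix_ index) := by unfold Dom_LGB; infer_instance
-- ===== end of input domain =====

-- B replaces A's backward counting loop (owed-operand counter) by a direct recursion on the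
-- nested postfix structure: objective 'alternative' (same cost, different decomposition).
-- Negative indices wrap exactly as in Python (PySem.List.pyGet?); where Python raises
-- IndexError the ports return the junk value 0 and Pre_LGB excludes those inputs.

def pvFUNCTIONS : List String := ["sin", "cos", "tan", "log", "exp", "sqrt", "ctg", "neg"]

def pvOPERATORS : List String := ["+", "-", "*", "/", "^"]

-- ===== PORT A =====
-- the while-loop of A: state (remaining, i); none = IndexError
def LGB_loop (postfix_ : List String) (remaining : Int) (i : Int) : Option Int :=
  if h : remaining > 0 then
    match hg : PySem.List.pyGet? postfix_ i with
    | none => none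
    | some t =>
      if t ∈ pvFUNCTIONS then LGB_loop postfix_ (remaining - 1 + 1) (i - 1)
      else if t ∈ pvOPERATORS then LGB_loop postfix_ (remaining - 1 + 2) (i - 1)
      else LGB_loop postfix_ (remaining - 1) (i - 1)
  else some (i + 1)
termination_by (i + postfix_.length + 1).toNat
decreasing_by
  all_goals
    have hin : -(postfix_.length : Int) ≤ i ∧ i < postfix_.length := by
      have := (PySem.List.pyGet?_eq_none_iff (xs := postfix_) (i := i))
      by_contra hc
      simp [PySem.Raise.InRange] at this
      rw [hg] at this
      simp at this
      omega
    omega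

def LGB (postfix_ : List String) (index : Int) : Int :=
  (LGB_loop postfix_ 1 index).getD 0

-- ===== PORT B =====
-- recursive start(end): start index of the subexpression ending at `end`; the returned
-- index is ≤ `end` (carried in the subtype, which justifies the nested recursive call)
def LGB_start (postfix_ : List String) (e : Int) : Option { s : Int // s ≤ e } :=
  match hg : PySem.List.pyGet? postfix_ e with
  | none => none
  | some t =>
    if t ∈ pvFUNCTIONS then
      match LGB_start postfix_ (e - 1) with
      | none => none
      | some ⟨s, hs⟩ => some ⟨s, by omega⟩
    else if t ∈ pvOPERATORS then
      match LGB_start postfix_ (e - 1) with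
      | none => none
      | some ⟨s, hs⟩ =>
        match LGB_start postfix_ (s - 1) with
        | none => none
        | some ⟨s2, hs2⟩ => some ⟨s2, by omega⟩
    else some ⟨e, le_refl e⟩
termination_by (e + postfix_.length + 1).toNat
decreasing_by
  all_goals
    have hin : -(postfix_.length : Int) ≤ e ∧ e < postfix_.length := by
      have := (PySem.List.pyGet?_eq_none_iff (xs := postfix_) (i := e))
      by_contra hc
      simp [PySem.Raise.InRange] at this
      rw [hg] at this
      simp at this
      omega
    omega

def LGB_alt (postfix_ : List String) (index : Int) : Int :=
  match LGB_start postfix_ index with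
  | none => 0
  | some s => s.1

-- ===== PRECONDITION & SPEC =====
-- token weight: net change of the number of still-owed operands when this token is read
def pvWeight (t : String) : Int :=
  if t ∈ pvFUNCTIONS then 0 else if t ∈ pvOPERATORS then 1 else -1

-- Pre_LGB = exactly the inputs on which Python A returns (no IndexError): index is a valid
-- Python index and, scanning backward (with wrap), the owed-operand balance reaches 0
-- before the position falls below -len.  Stated as a prefix-sum condition on the input.
def Pre_LGB (postfix_ : List String) (index : Int) : Prop :=
  -(postfix_.length : Int) ≤ index ∧ index < postfix_.length ∧
  ∃ k ≤ (index + postfix_.length).toNat,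
    1 + ((List.range (k + 1)).map
      (fun j => pvWeight ((PySem.List.pyGet? postfix_ (index - j)).getD ""))).sum = 0
instance (postfix_ : List String) (index : Int) : Decidable (Pre_LGB postfix_ index) := by
  unfold Pre_LGB; infer_instance

def pvWitness_LGB : List String × Int := (["x", "2", "+"], 2)

def Spec_LGB (postfix_ : List String) (index : Int) (out : Int) : Prop := out = LGB_alt postfix_ index
instance (postfix_ : List String) (index : Int) (out : Int) : Decidable (Spec_LGB postfix_ index out) := by unfold Spec_LGB; infer_instance

-- ===== CLAIM (what is proved, stated in full; the proofs are below) =====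
def Claim_equal_LGB : Prop := ∀ (postfix_ : List String) (index : Int), Dom_LGB postfix_ index → Pre_LGB postfix_ index → Spec_LGB postfix_ index (LGB postfix_ index)

-- ===== LEMMAS AND PROOFS =====

-- the loop with counter r+1 = one `start` descent followed by the loop with counter r
theorem LGB_loop_eq_start (postfix_ : List String) (e : Int) :
    ∀ r : Int, 0 ≤ r →
      LGB_loop postfix_ (r + 1) e =
        match LGB_start postfix_ e with
        | none => none
        | some s => LGB_loop postfix_ r (s.1 - 1) := by
  induction e using LGB_start.induct postfix_ with
  | case1 x hg =>
    intro r hr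
    rw [LGB_loop, LGB_start]
    simp only [dif_pos (show r + 1 > 0 by omega)]
    split <;> rename_i heq <;> rw [hg] at heq <;> try simp at heq
  | case2 x t hg hf hnone ih =>
    intro r hr
    rw [LGB_loop, LGB_start]
    simp only [dif_pos (show r + 1 > 0 by omega)]
    split <;> rename_i heq <;> rw [hg] at heq <;> try simp at heq
    case _ =>
      subst heq
      rw [if_pos hf, show r + 1 - 1 + 1 = r + 1 by ring, ih r hr, hnone]
      simp [if_pos hf]
  | case3 x t hg hf s hs hsome ih =>
    intro r hr
    rw [LGB_loop, LGB_start]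
    simp only [dif_pos (show r + 1 > 0 by omega)]
    split <;> rename_i heq <;> rw [hg] at heq <;> try simp at heq
    case _ =>
      subst heq
      rw [if_pos hf, show r + 1 - 1 + 1 = r + 1 by ring, ih r hr, hsome]
      simp [if_pos hf]
  | case4 x t hg hf hop hnone ih =>
    intro r hr
    rw [LGB_loop, LGB_start]
    simp only [dif_pos (show r + 1 > 0 by omega)]
    split <;> rename_i heq <;> rw [hg] at heq <;> try simp at heq
    case _ =>
      subst heq
      rw [if_neg hf, if_pos hop, show r + 1 - 1 + 2 = r + 1 + 1 by ring,
        ih (r + 1) (by omega), hnone]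
      simp [if_pos hop]
  | case5 x t hg hf hop s hs hsome hnone ih1 ih2 =>
    intro r hr
    rw [LGB_loop, LGB_start]
    simp only [dif_pos (show r + 1 > 0 by omega)]
    split <;> rename_i heq <;> rw [hg] at heq <;> try simp at heq
    case _ =>
      subst heq
      rw [if_neg hf, if_pos hop, show r + 1 - 1 + 2 = r + 1 + 1 by ring,
        ih1 (r + 1) (by omega), hsome]
      simp only
      rw [ih2 r hr, hnone]
      simp [if_neg hf, if_pos hop]
  | case6 x t hg hf hop s hs hsome s1 hs1 hsome1 ih1 ih2 =>
    intro r hr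
    rw [LGB_loop, LGB_start]
    simp only [dif_pos (show r + 1 > 0 by omega)]
    split <;> rename_i heq <;> rw [hg] at heq <;> try simp at heq
    case _ =>
      subst heq
      rw [if_neg hf, if_pos hop, show r + 1 - 1 + 2 = r + 1 + 1 by ring,
        ih1 (r + 1) (by omega), hsome]
      simp only
      rw [ih2 r hr, hsome1]
      simp [if_neg hf, if_pos hop]
  | case7 x t hg hf hop =>
    intro r hr
    rw [LGB_loop, LGB_start]
    simp only [dif_pos (show r + 1 > 0 by omega)]
    split <;> rename_i heq <;> rw [hg] at heq <;> try simp at heq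
    case _ =>
      subst heq
      rw [if_neg hf, if_neg hop, show r + 1 - 1 = r by ring]
      simp [if_neg hf, if_neg hop]

theorem LGB_eq_alt (postfix_ : List String) (index : Int) :
    LGB postfix_ index = LGB_alt postfix_ index := by
  unfold LGB LGB_alt
  have h := LGB_loop_eq_start postfix_ index 0 (le_refl 0)
  norm_num at h
  rw [h]
  cases LGB_start postfix_ index with
  | none => rfl
  | some s => simp [LGB_loop]

-- ===== VERDICT (by name: the statement is the Claim_ definition above) =====
theorem LGB_spec : Claim_equal_LGB := by
  intro postfix_ index _ _
  unfold Spec_LGB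
  exact LGB_eq_alt postfix_ index
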